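-- pv_equiv track=rewrite | github.com/Levintsky/topcoder | python/leetcode/dp/knapsack/1092_shortest_common.py | find_
-- ===== SOURCE A (Python) =====
-- def find_(st1, st2):
--     start = -1
--     len_ = -1
--     n1, n2 = len(st1), len(st2)
--     for start_j in range(n2):
--         j = start_j
--         for i in range(n1):
--             if st1[i] == st2[j]:
--                 j += 1
--             if j == n2:
--                 break
--         tmplen_ = j - start_j
--         if tmplen_ > len_:
--             start = start_j
--             len_ = tmplen_
--     res = st1
--     if start > 0:
--         res = st2[:start] + res
--     res += st2[start + len_ :]
--     return res
-- ===== SOURCE B (Python) =====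
-- def find_(st1, st2):
--     n1, n2 = len(st1), len(st2)
--     # next-occurrence table: nxt[i] maps char c to the smallest k >= i with st1[k] == c
--     nxt = [None] * (n1 + 1)
--     nxt[n1] = {}
--     for i in range(n1 - 1, -1, -1):
--         d = dict(nxt[i + 1])
--         d[st1[i]] = i
--         nxt[i] = d
--     best_start, best_len = -1, -1
--     for start_j in range(n2):
--         pos = 0
--         j = start_j
--         while j < n2:
--             k = nxt[pos].get(st2[j])
--             if k is None:
--                 break
--             pos = k + 1
--             j += 1
--         if j - start_j > best_len:
--             best_start, best_len = start_j, j - start_j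
--     res = st1
--     if best_start > 0:
--         res = st2[:best_start] + res
--     return res + st2[best_start + best_len:]
-- ===== Notes on version B (the rewrite author's own statement) =====
-- stated objective: alternative
-- what changed: Replaces A's per-start full scan of st1 with a precomputed next-occurrence table over st1 and greedy index jumps per start with early exit on an unreachable character (measured ~2.5-3x faster on the generated inputs, but both still quadratic in the worst case, so not claimed as faster).
import Mathlib
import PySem

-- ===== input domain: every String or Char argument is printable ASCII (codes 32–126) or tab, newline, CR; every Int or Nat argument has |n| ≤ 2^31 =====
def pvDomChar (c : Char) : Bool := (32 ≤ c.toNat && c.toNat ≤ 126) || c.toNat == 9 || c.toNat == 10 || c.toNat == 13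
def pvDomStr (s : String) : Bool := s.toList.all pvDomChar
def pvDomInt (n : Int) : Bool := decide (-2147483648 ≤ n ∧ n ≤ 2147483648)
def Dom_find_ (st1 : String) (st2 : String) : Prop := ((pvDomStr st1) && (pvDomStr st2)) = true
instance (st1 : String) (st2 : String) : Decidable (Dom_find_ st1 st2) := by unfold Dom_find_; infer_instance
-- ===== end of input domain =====

-- B replaces A's per-start full scan of st1 by a precomputed next-occurrence table over st1
-- with greedy index jumps per start and early exit on an unreachable character (alternative algorithm).

-- ===== PORT A =====
-- inner loop of A: for i over the chars of st1, advance j on st1[i] == st2[j], break at j == n2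
def pvAInner (s2 : List Char) (n2 : Nat) : List Char → Nat → Nat
  | [], j => j
  | c :: rest, j =>
      let j' := if s2[j]? = some c then j + 1 else j
      if j' = n2 then j' else pvAInner s2 n2 rest j'

-- outer loop of A: for start_j in range(n2), keep the first start with the longest match
def pvAOuter (s1 s2 : List Char) (n2 : Nat) : List Nat → Int × Int → Int × Int
  | [], acc => acc
  | sj :: rest, (start, len_) =>
      let j := pvAInner s2 n2 s1 sj
      let tmplen : Int := (j : Int) - (sj : Int)
      if tmplen > len_ then pvAOuter s1 s2 n2 rest ((sj : Int), tmplen)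
      else pvAOuter s1 s2 n2 rest (start, len_)

def find_ (st1 : String) (st2 : String) : String :=
  let s1 := st1.toList
  let s2 := st2.toList
  let n2 := s2.length
  let p := pvAOuter s1 s2 n2 (List.range n2) (-1, -1)
  let res := s1
  let res := if p.1 > 0 then PySem.List.slice s2 none (some p.1) ++ res else res
  let res := res ++ PySem.List.slice s2 (some (p.1 + p.2)) none
  String.ofList res

-- ===== PORT B =====
-- Source B's downward table build: pvBuildNxt s1 i is [nxt[i], nxt[i+1], …] for the suffix s1
-- (nxt[i] = copy of nxt[i+1] with st1[i] ↦ i, exactly the Python loop, absolute index carried in i)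
def pvBuildNxt (s1 : List Char) (i : Nat) : List (PySem.Dict Char Nat) :=
  match s1 with
  | [] => [PySem.Dict.empty]
  | c :: rest =>
      let t := pvBuildNxt rest (i + 1)
      ((t.headD PySem.Dict.empty).insert c i) :: t

-- Source B's while loop: greedy jumps via the table, early exit on a missing character
def pvBInner (nxt : List (PySem.Dict Char Nat)) (s2 : List Char) (n2 : Nat) (pos j : Nat) : Nat :=
  if h : j < n2 then
    match (nxt.getD pos PySem.Dict.empty).get? (s2.getD j ' ') with
    | none => j
    | some k => pvBInner nxt s2 n2 (k + 1) (j + 1)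
  else j
termination_by n2 - j

def pvBOuter (nxt : List (PySem.Dict Char Nat)) (s2 : List Char) (n2 : Nat) :
    List Nat → Int × Int → Int × Int
  | [], acc => acc
  | sj :: rest, (bs, bl) =>
      let j := pvBInner nxt s2 n2 0 sj
      if (j : Int) - (sj : Int) > bl then pvBOuter nxt s2 n2 rest ((sj : Int), (j : Int) - (sj : Int))
      else pvBOuter nxt s2 n2 rest (bs, bl)

def find__alt (st1 : String) (st2 : String) : String :=
  let s1 := st1.toList
  let s2 := st2.toList
  let n2 := s2.length
  let nxt := pvBuildNxt s1 0
  let p := pvBOuter nxt s2 n2 (List.range n2) (-1, -1)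
  let res := s1
  let res := if p.1 > 0 then PySem.List.slice s2 none (some p.1) ++ res else res
  let res := res ++ PySem.List.slice s2 (some (p.1 + p.2)) none
  String.ofList res

-- ===== PRECONDITION & SPEC =====
def Spec_find_ (st1 : String) (st2 : String) (out : String) : Prop := out = find__alt st1 st2
instance (st1 : String) (st2 : String) (out : String) : Decidable (Spec_find_ st1 st2 out) := by unfold Spec_find_; infer_instance

-- ===== CLAIM (what is proved, stated in full; the proofs are below) =====
def Claim_equal_find_ : Prop := ∀ (st1 : String) (st2 : String), Dom_find_ st1 st2 → Spec_find_ st1 st2 (find_ st1 st2)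

-- ===== LEMMAS AND PROOFS =====

-- first-occurrence position of c in a list, relative
def pvSpecFind (c : Char) : List Char → Option Nat
  | [] => none
  | c' :: rest => if c' = c then some 0 else (pvSpecFind c rest).map (· + 1)

theorem pvBuildNxt_head (s1 : List Char) (i : Nat) (c : Char) :
    ((pvBuildNxt s1 i).headD PySem.Dict.empty).get? c = (pvSpecFind c s1).map (i + ·) := by
  induction s1 generalizing i with
  | nil => simp [pvBuildNxt, pvSpecFind]
  | cons c' rest ih =>
    simp only [pvBuildNxt, List.headD_cons, pvSpecFind]
    rw [PySem.Dict.get?_insert]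
    by_cases h : c = c'
    · simp [h]
    · have h' : ¬ c' = c := fun e => h e.symm
      simp only [if_neg h, if_neg h', ih, Option.map_map]
      cases pvSpecFind c rest <;> simp <;> omega

theorem pvBuildNxt_getD (s1 : List Char) (i pos : Nat) :
    (pvBuildNxt s1 i).getD pos PySem.Dict.empty
      = (pvBuildNxt (s1.drop pos) (i + pos)).headD PySem.Dict.empty := by
  induction pos generalizing s1 i with
  | zero =>
    cases s1 <;> simp [pvBuildNxt]
  | succ p ih =>
    cases s1 with
    | nil => simp [pvBuildNxt, PySem.Dict.get?_empty]
    | cons c rest =>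
      simp only [pvBuildNxt, List.getD_cons_succ, List.drop_succ_cons]
      rw [ih]
      ring_nf

theorem pvBuildNxt_lookup (s1 : List Char) (pos : Nat) (c : Char) :
    ((pvBuildNxt s1 0).getD pos PySem.Dict.empty).get? c
      = (pvSpecFind c (s1.drop pos)).map (pos + ·) := by
  rw [pvBuildNxt_getD, pvBuildNxt_head]
  simp

theorem pvBInner_step (nxt : List (PySem.Dict Char Nat)) (s2 : List Char) (n2 pos j : Nat)
    (hj : j < n2) :
    pvBInner nxt s2 n2 pos j
      = match (nxt.getD pos PySem.Dict.empty).get? (s2.getD j ' ') with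
        | none => j
        | some k => pvBInner nxt s2 n2 (k + 1) (j + 1) := by
  rw [pvBInner, dif_pos hj]

theorem pvInner_eq (s1 s2 : List Char) :
    ∀ (suf : List Char) (pos j : Nat), s1.drop pos = suf → j < s2.length →
      pvAInner s2 s2.length suf j = pvBInner (pvBuildNxt s1 0) s2 s2.length pos j := by
  intro suf
  induction suf with
  | nil =>
    intro pos j hdrop hj
    rw [pvBInner]
    simp only [dif_pos hj, pvBuildNxt_lookup, hdrop, pvSpecFind, Option.map_none]
    rfl
  | cons c0 rest ih =>
    intro pos j hdrop hj
    have hrest : s1.drop (pos + 1) = rest := by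
      rw [← List.drop_drop, hdrop]
      rfl
    have hsj : s2.getD j ' ' = s2[j]'hj := List.getD_eq_getElem s2 ' ' hj
    rw [pvBInner_step _ _ _ _ _ hj]
    simp only [pvBuildNxt_lookup, hdrop, pvSpecFind]
    by_cases hc : c0 = s2.getD j ' '
    · -- matching character: A advances j, B jumps to pos+1
      have hc' : s2[j]? = some c0 := by
        rw [List.getElem?_eq_getElem hj, ← hsj, hc]
      simp only [if_pos hc, Option.map_some, Nat.add_zero]
      simp only [pvAInner, if_pos hc']
      by_cases hend : j + 1 = s2.length
      · rw [if_pos hend, pvBInner, dif_neg (by omega : ¬ j + 1 < s2.length)]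
      · rw [if_neg hend]
        exact ih (pos + 1) (j + 1) hrest (by omega)
    · -- non-matching character: A skips it; B's lookup lands past it either way
      have hc' : ¬ s2[j]? = some c0 := by
        rw [List.getElem?_eq_getElem hj, ← hsj]
        intro e
        exact hc (Option.some.injEq _ _ ▸ e).symm
      simp only [if_neg hc]
      simp only [pvAInner, if_neg hc', if_neg (by omega : ¬ j = s2.length)]
      rw [ih (pos + 1) j hrest hj, pvBInner_step _ _ _ _ _ hj]
      simp only [pvBuildNxt_lookup, hrest]
      cases hsf : pvSpecFind (s2.getD j ' ') rest with
      | none => simp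
      | some k =>
        simp only [Option.map_some]
        have h1 : pos + 1 + k = pos + (k + 1) := by omega
        rw [h1]

theorem pvOuter_eq (s1 s2 : List Char) (l : List Nat) (acc : Int × Int)
    (hl : ∀ sj ∈ l, sj < s2.length) :
    pvAOuter s1 s2 s2.length l acc = pvBOuter (pvBuildNxt s1 0) s2 s2.length l acc := by
  induction l generalizing acc with
  | nil => rfl
  | cons sj rest ih =>
    obtain ⟨start, len_⟩ := acc
    have hsj := hl sj (List.mem_cons_self)
    have hrest : ∀ x ∈ rest, x < s2.length := fun x hx => hl x (List.mem_cons_of_mem _ hx)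
    simp only [pvAOuter, pvBOuter,
      pvInner_eq s1 s2 s1 0 sj rfl hsj]
    split_ifs <;> exact ih _ hrest

-- ===== VERDICT (by name: the statement is the Claim_ definition above) =====
theorem find__spec : Claim_equal_find_ := by
  intro st1 st2 _
  simp only [Spec_find_, find_, find__alt,
    pvOuter_eq st1.toList st2.toList (List.range st2.toList.length) (-1, -1)
      (fun sj hsj => List.mem_range.mp hsj)]
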